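-- pv_equiv track=rewrite | github.com/emash90/workout-buddy | ai-service/src/services/research_service.py | _filter_trusted_sources
-- ===== SOURCE A (Python) =====
-- from typing import List, Dict, Optional
--
-- def _filter_trusted_sources(results: List[Dict]) -> List[Dict]:
--     """Prioritize trusted fitness sources."""
--     trusted_domains = [
--         'pubmed.ncbi.nlm.nih.gov',
--         'acsm.org',
--         'nsca.com',
--         'mayoclinic.org',
--         'health.harvard.edu',
--         'nih.gov',
--         'acefitness.org',
--         'nasm.org',
--         'strongerbyscience.com',
--         'examine.com'
--     ]
--
--     trusted = []
--     other = []
--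
--     for r in results:
--         link = r.get('link', '')
--         is_trusted = any(domain in link for domain in trusted_domains)
--         if is_trusted:
--             trusted.append(r)
--         else:
--             other.append(r)
--
--     # Return trusted first, then others
--     return (trusted + other)[:15]
-- ===== SOURCE B (Python) =====
-- from typing import List, Dict
--
-- def _filter_trusted_sources(results: List[Dict]) -> List[Dict]:
--     """Prioritize trusted fitness sources via one stable sort on a 0/1 rank."""
--     trusted_domains = [
--         'pubmed.ncbi.nlm.nih.gov',
--         'acsm.org',
--         'nsca.com',
--         'mayoclinic.org',
--         'health.harvard.edu',
--         'nih.gov',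
--         'acefitness.org',
--         'nasm.org',
--         'strongerbyscience.com',
--         'examine.com'
--     ]
--
--     def rank(r):
--         link = r.get('link', '')
--         return 0 if any(domain in link for domain in trusted_domains) else 1
--
--     # stable sort: trusted (rank 0) keep order and precede others (rank 1)
--     return sorted(results, key=rank)[:15]
-- ===== Notes on version B (the rewrite author's own statement) =====
-- stated objective: idiomatic
-- what changed: Replaces the manual two-list partition loop and concatenation with a single stable sort on a 0/1 trust rank followed by a [:15] slice.
import Mathlib
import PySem

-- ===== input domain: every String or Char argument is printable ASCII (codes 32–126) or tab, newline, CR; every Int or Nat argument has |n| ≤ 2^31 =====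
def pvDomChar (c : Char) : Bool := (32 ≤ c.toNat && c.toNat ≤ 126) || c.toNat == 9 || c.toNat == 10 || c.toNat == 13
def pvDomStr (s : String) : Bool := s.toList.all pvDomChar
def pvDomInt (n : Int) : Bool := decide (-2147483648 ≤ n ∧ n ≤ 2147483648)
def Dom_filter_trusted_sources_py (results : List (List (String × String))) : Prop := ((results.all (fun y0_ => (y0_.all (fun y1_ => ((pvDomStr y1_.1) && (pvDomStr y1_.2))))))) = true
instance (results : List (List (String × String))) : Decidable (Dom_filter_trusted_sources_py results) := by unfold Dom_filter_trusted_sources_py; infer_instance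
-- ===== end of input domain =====

-- B replaces A's two-list partition loop by one stable sort on a 0/1 trust rank (idiomatic; same results)

def pvTrustedDomains : List String :=
  ["pubmed.ncbi.nlm.nih.gov", "acsm.org", "nsca.com", "mayoclinic.org",
   "health.harvard.edu", "nih.gov", "acefitness.org", "nasm.org",
   "strongerbyscience.com", "examine.com"]

-- ===== PORT A =====
-- A's loop: partition results into (trusted, other), then (trusted + other)[:15]
def filter_trusted_sources_py (results : List (List (String × String))) : List (List (String × String)) :=
  let acc := results.foldl
    (fun (acc : List (List (String × String)) × List (List (String × String))) r =>
      let link := (PySem.Dict.mk r).getD "link" ""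
      let is_trusted := pvTrustedDomains.any (fun domain => PySem.Str.isIn domain link)
      if is_trusted then (acc.1 ++ [r], acc.2) else (acc.1, acc.2 ++ [r]))
    ([], [])
  PySem.List.slice (acc.1 ++ acc.2) none (some 15)

-- ===== PORT B =====
-- B's rank: 0 for trusted links, 1 otherwise
def pvRank (r : List (String × String)) : Int :=
  if pvTrustedDomains.any (fun domain => PySem.Str.isIn domain ((PySem.Dict.mk r).getD "link" ""))
  then 0 else 1

-- B: sorted(results, key=rank)[:15]
def filter_trusted_sources_py_alt (results : List (List (String × String))) : List (List (String × String)) :=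
  PySem.List.slice (PySem.List.sorted results pvRank) none (some 15)

-- ===== PRECONDITION & SPEC =====
def Spec_filter_trusted_sources_py (results : List (List (String × String))) (out : List (List (String × String))) : Prop := out = filter_trusted_sources_py_alt results
instance (results : List (List (String × String))) (out : List (List (String × String))) : Decidable (Spec_filter_trusted_sources_py results out) := by unfold Spec_filter_trusted_sources_py; infer_instance

-- ===== CLAIM (what is proved, stated in full; the proofs are below) =====
def Claim_equal_filter_trusted_sources_py : Prop := ∀ (results : List (List (String × String))), Dom_filter_trusted_sources_py results → Spec_filter_trusted_sources_py results (filter_trusted_sources_py results)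

-- ===== LEMMAS AND PROOFS =====

-- the trust predicate shared by the analyses below
def pvTrusted (r : List (String × String)) : Bool :=
  pvTrustedDomains.any (fun domain => PySem.Str.isIn domain ((PySem.Dict.mk r).getD "link" ""))

lemma pvRank_eq (r : List (String × String)) : pvRank r = if pvTrusted r then 0 else 1 := rfl

-- A's loop is a partition: the state (t, o) accumulates the two filters
lemma pvFoldA (xs : List (List (String × String)))
    (t o : List (List (String × String))) :
    xs.foldl
      (fun (acc : List (List (String × String)) × List (List (String × String))) r =>
        if pvTrusted r then (acc.1 ++ [r], acc.2) else (acc.1, acc.2 ++ [r]))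
      (t, o)
    = (t ++ xs.filter pvTrusted, o ++ xs.filter (fun r => ! pvTrusted r)) := by
  induction xs generalizing t o with
  | nil => simp
  | cons x xs ih =>
    rw [List.foldl_cons]
    by_cases h : pvTrusted x = true
    · simp [h, ih]
    · rw [Bool.not_eq_true] at h
      simp [h, ih]

-- inserting x before exactly the suffix where `before` holds
lemma pvInsertBy_mid (before : List (String × String) → List (String × String) → Bool)
    (x : List (String × String)) (t o : List (List (String × String)))
    (ht : ∀ y ∈ t, before x y = false) (ho : ∀ y ∈ o, before x y = true) :
    PySem.List.insertBy before x (t ++ o) = t ++ x :: o := by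
  induction t with
  | nil =>
    cases o with
    | nil => rfl
    | cons y ys => simp [PySem.List.insertBy, ho y (by simp)]
  | cons z t ih =>
    have hz := ht z (by simp)
    simp only [List.cons_append, PySem.List.insertBy, hz]
    simp only [Bool.false_eq_true, if_false]
    rw [ih (fun y hy => ht y (by simp [hy]))]

-- B's stable sort on the 0/1 rank performs the same partition
lemma pvFoldB (xs : List (List (String × String)))
    (t o : List (List (String × String)))
    (ht : ∀ y ∈ t, pvTrusted y = true) (ho : ∀ y ∈ o, pvTrusted y = false) :
    xs.foldl
      (fun acc x => PySem.List.insertBy (fun a b => decide (pvRank a < pvRank b)) x acc)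
      (t ++ o)
    = (t ++ xs.filter pvTrusted) ++ (o ++ xs.filter (fun r => ! pvTrusted r)) := by
  induction xs generalizing t o with
  | nil => simp
  | cons x xs ih =>
    rw [List.foldl_cons]
    by_cases h : pvTrusted x = true
    · have hins : PySem.List.insertBy (fun a b => decide (pvRank a < pvRank b)) x (t ++ o)
          = t ++ x :: o := by
        apply pvInsertBy_mid
        · intro y hy; simp [pvRank_eq, h, ht y hy]
        · intro y hy; simp [pvRank_eq, h, ho y hy]
      have htx : ∀ y ∈ t ++ [x], pvTrusted y = true := by
        intro y hy
        rcases List.mem_append.mp hy with hy | hy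
        · exact ht y hy
        · simp at hy; subst hy; exact h
      rw [hins, show t ++ x :: o = (t ++ [x]) ++ o by simp, ih (t ++ [x]) o htx ho]
      simp [h]
    · rw [Bool.not_eq_true] at h
      have hins : PySem.List.insertBy (fun a b => decide (pvRank a < pvRank b)) x (t ++ o)
          = (t ++ o) ++ [x] := by
        apply PySem.List.insertBy_of_forall_not_before
        intro y hy
        by_cases hy' : pvTrusted y = true <;> simp [pvRank_eq, h, hy']
      have hox : ∀ y ∈ o ++ [x], pvTrusted y = false := by
        intro y hy
        rcases List.mem_append.mp hy with hy | hy
        · exact ho y hy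
        · simp at hy; subst hy; exact h
      rw [hins, show (t ++ o) ++ [x] = t ++ (o ++ [x]) by simp, ih t (o ++ [x]) ht hox]
      simp [h]

-- ===== VERDICT (by name: the statement is the Claim_ definition above) =====
theorem filter_trusted_sources_py_spec : Claim_equal_filter_trusted_sources_py := by
  intro results _
  unfold Spec_filter_trusted_sources_py filter_trusted_sources_py filter_trusted_sources_py_alt
  rw [PySem.List.sorted_eq_foldl_insertBy]
  have hb := pvFoldB results [] [] (by simp) (by simp)
  simp only [List.nil_append] at hb
  rw [hb]
  have ha := pvFoldA results [] []
  simp only [List.nil_append] at ha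
  exact congrArg (fun p => PySem.List.slice (p.1 ++ p.2) none (some 15)) ha
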